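-- pv_equiv track=rewrite | github.com/spktrm/porygon2 | ml/arch/config.py | camel_case_path
-- ===== SOURCE A (Python) =====
-- def camel_case_path(path_list):
--     """Converts a list of path components to a CamelCase string."""
--     return "".join(
--         [
--             (
--                 word.capitalize()
--                 if len(word.split("_")) <= 1
--                 else camel_case_path(word.split("_"))
--             )
--             for word in path_list
--         ]
--     )
-- ===== SOURCE B (Python) =====
-- def camel_case_path(path_list):
--     """Converts a list of path components to a CamelCase string."""
--     return "".join(
--         part.capitalize() for word in path_list for part in word.split("_")
--     )
-- ===== Notes on version B (the rewrite author's own statement) =====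
-- stated objective: simpler
-- what changed: Replaced the conditional self-recursion (which only ever goes one level deep, since split('_') yields underscore-free segments) with a single flat generator pass that splits each word on '_' and capitalizes every segment.
import Mathlib
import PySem

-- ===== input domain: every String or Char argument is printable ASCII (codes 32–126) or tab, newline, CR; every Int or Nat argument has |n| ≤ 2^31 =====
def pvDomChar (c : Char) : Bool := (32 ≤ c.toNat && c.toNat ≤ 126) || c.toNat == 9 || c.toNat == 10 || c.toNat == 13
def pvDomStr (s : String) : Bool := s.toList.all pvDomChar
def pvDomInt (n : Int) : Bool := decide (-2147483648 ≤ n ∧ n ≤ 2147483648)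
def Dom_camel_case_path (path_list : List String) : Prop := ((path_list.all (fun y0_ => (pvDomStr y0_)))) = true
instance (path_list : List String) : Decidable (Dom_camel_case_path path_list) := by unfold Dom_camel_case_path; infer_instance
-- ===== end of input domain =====

-- ===== PORT A =====
-- B changes: the conditional self-recursion is replaced by one flat pass splitting each
-- word on '_' and capitalizing every segment (objective: simpler).

-- Python's str.capitalize(): first char uppercased, the rest lowercased (exact on ASCII).
def pyCapitalize (w : String) : String :=
  match w.toList with
  | [] => String.ofList []
  | c :: rest => String.ofList (PySem.Chars.upperChar c :: rest.map PySem.Chars.lowerChar)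

-- measure used only for termination of port A
def ccpMeasure (xs : List String) : Nat :=
  (xs.map (fun w => 2 * w.toList.count '_' + 1)).sum

-- simple structural characterisation of splitting on '_' (proved equal to
-- PySem.Chars.splitOn below); used by the termination proof of port A.
def mySplit : List Char → List (List Char)
  | [] => [[]]
  | c :: rest => if c = '_' then [] :: mySplit rest
                 else (mySplit rest).modifyHead (c :: ·)

theorem mySplit_ne_nil (s : List Char) : mySplit s ≠ [] := by
  induction s with
  | nil => simp [mySplit]
  | cons c rest ih =>
    simp only [mySplit]
    split_ifs
    · simp
    · cases h : mySplit rest with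
      | nil => exact absurd h ih
      | cons a t => simp [List.modifyHead]

theorem length_mySplit (s : List Char) : (mySplit s).length = s.count '_' + 1 := by
  induction s with
  | nil => simp [mySplit]
  | cons c rest ih =>
    simp only [mySplit]
    split_ifs with h
    · simp [h, ih]
    · simpa [List.count_cons, h] using ih

theorem mem_mySplit_count {s t : List Char} (h : t ∈ mySplit s) : t.count '_' = 0 := by
  induction s generalizing t with
  | nil => simp [mySplit] at h; simp [h]
  | cons c rest ih =>
    simp only [mySplit] at h
    split_ifs at h with hc
    · rcases List.mem_cons.1 h with h | h
      · simp [h]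
      · exact ih h
    · cases hrest : mySplit rest with
      | nil => exact absurd hrest (mySplit_ne_nil rest)
      | cons a tl =>
        rw [hrest] at h
        simp only [List.modifyHead, List.mem_cons] at h
        rcases h with h | h
        · have ha : a ∈ mySplit rest := by rw [hrest]; exact List.mem_cons_self
          have := ih ha
          simp [h, hc, this]
        · exact ih (by rw [hrest]; exact List.mem_cons_of_mem _ h)

theorem mySplit_of_count_zero {s : List Char} (h : s.count '_' = 0) : mySplit s = [s] := by
  induction s with
  | nil => simp [mySplit]
  | cons c rest ih =>
    simp only [List.count_cons] at h
    have hc : ¬ c = '_' := by intro hc; simp [hc] at h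
    have h0 : rest.count '_' = 0 := by omega
    simp [mySplit, hc, ih h0, List.modifyHead]

-- PySem.Chars.splitOn on the single-char separator '_' equals mySplit
theorem splitOn_go_eq (fuel : Nat) (l cur : List Char) (acc : List (List Char))
    (hf : l.length ≤ fuel) :
    PySem.Chars.splitOn.go ['_'] fuel l cur acc
      = acc.reverse ++ (mySplit l).modifyHead (cur.reverse ++ ·) := by
  induction fuel generalizing l cur acc with
  | zero =>
    have : l = [] := List.length_eq_zero_iff.1 (Nat.le_zero.1 hf)
    subst this
    simp [PySem.Chars.splitOn.go, mySplit, List.modifyHead]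
  | succ f ih =>
    cases l with
    | nil => simp [PySem.Chars.splitOn.go, mySplit, List.modifyHead]
    | cons c rest =>
      simp only [List.length_cons, Nat.succ_le_succ_iff] at hf
      by_cases hc : c = '_'
      · subst hc
        rw [show PySem.Chars.splitOn.go ['_'] (f+1) ('_' :: rest) cur acc
              = PySem.Chars.splitOn.go ['_'] f (List.drop 1 ('_' :: rest)) [] (cur.reverse :: acc) by
            simp [PySem.Chars.splitOn.go, List.isPrefixOf]]
        rw [List.drop_one, List.tail_cons, ih rest [] (cur.reverse :: acc) hf]
        cases hrest : mySplit rest with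
        | nil => exact absurd hrest (mySplit_ne_nil rest)
        | cons a tl => simp [mySplit, hrest, List.modifyHead]
      · rw [show PySem.Chars.splitOn.go ['_'] (f+1) (c :: rest) cur acc
              = PySem.Chars.splitOn.go ['_'] f rest (c :: cur) acc by
            simp only [PySem.Chars.splitOn.go, List.isPrefixOf]
            split_ifs with h
            · simp only [Bool.and_eq_true, beq_iff_eq] at h
              exact absurd h.1.symm hc
            · rfl]
        rw [ih rest (c :: cur) acc hf]
        cases hrest : mySplit rest with
        | nil => exact absurd hrest (mySplit_ne_nil rest)
        | cons a tl => simp [mySplit, hrest, hc, List.modifyHead]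

theorem splitOn_eq_mySplit (s : List Char) :
    PySem.Chars.splitOn s ['_'] = mySplit s := by
  rw [PySem.Chars.splitOn, splitOn_go_eq (s.length + 1) s [] [] (by omega)]
  cases hs : mySplit s with
  | nil => exact absurd hs (mySplit_ne_nil s)
  | cons a tl => simp [List.modifyHead]

-- Port of A: per word, capitalize if the split has at most one piece, else recurse
-- on the pieces; join with "".
def camel_case_path (path_list : List String) : String :=
  PySem.Str.join "" (path_list.attach.map (fun w =>
    let parts := PySem.Chars.splitOn w.1.toList ['_']
    if parts.length ≤ 1 then pyCapitalize w.1
    else camel_case_path (parts.map String.ofList)))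
termination_by ccpMeasure path_list
decreasing_by
  rename_i hlen
  have hparts : parts = mySplit w.1.toList := splitOn_eq_mySplit w.1.toList
  have hcnt : 1 ≤ w.1.toList.count '_' := by
    by_contra hc
    have h0 : w.1.toList.count '_' = 0 := by omega
    rw [hparts, mySplit_of_count_zero h0] at hlen
    simp at hlen
  have hmu : ccpMeasure (parts.map String.ofList) = parts.length := by
    unfold ccpMeasure
    rw [List.map_map]
    have hone : ∀ p ∈ parts, (2 * (String.ofList p).toList.count '_' + 1 : Nat) = 1 := by
      intro p hp
      have h0 : p.count '_' = 0 := mem_mySplit_count (hparts ▸ hp)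
      simp [String.toList_ofList, h0]
    calc ((parts.map fun p => 2 * (String.ofList p).toList.count '_' + 1).sum)
        = ((parts.map fun _ => (1:Nat)).sum) := by rw [List.map_congr_left hone]
      _ = parts.length := by simp
  have hlb : 2 * w.1.toList.count '_' + 1 ≤ ccpMeasure path_list := by
    unfold ccpMeasure
    exact List.single_le_sum (by intro x _; omega) _ (List.mem_map_of_mem w.2)
  rw [hmu, hparts, length_mySplit]
  omega

-- ===== PORT B =====
-- one flat pass: split every word on '_', capitalize every piece, join with ""
def camel_case_path_alt (path_list : List String) : String :=
  PySem.Str.join "" (path_list.flatMap (fun word =>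
    (PySem.Chars.splitOn word.toList ['_']).map (fun p => pyCapitalize (String.ofList p))))

-- ===== PRECONDITION & SPEC =====
def Spec_camel_case_path (path_list : List String) (out : String) : Prop := out = camel_case_path_alt path_list
instance (path_list : List String) (out : String) : Decidable (Spec_camel_case_path path_list out) := by unfold Spec_camel_case_path; infer_instance

-- ===== CLAIM (what is proved, stated in full; the proofs are below) =====
def Claim_equal_camel_case_path : Prop := ∀ (path_list : List String), Dom_camel_case_path path_list → Spec_camel_case_path path_list (camel_case_path path_list)

-- ===== LEMMAS AND PROOFS =====

theorem intercalate_nil_sep (xs : List (List Char)) : ([]:List Char).intercalate xs = xs.flatten := by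
  induction xs with
  | nil => simp [List.intercalate, List.intersperse]
  | cons a t ih =>
    cases t with
    | nil => simp [List.intercalate, List.intersperse]
    | cons b t2 =>
      simp only [List.intercalate, List.intersperse] at *
      simp_all

theorem join_empty (parts : List String) :
    PySem.Str.join "" parts = String.ofList (parts.map String.toList).flatten := by
  simp [PySem.Str.join, PySem.Chars.join, intercalate_nil_sep]

-- the per-word body of A equals B's flat per-word contribution
theorem word_eq (w : String) :
    (let parts := PySem.Chars.splitOn w.toList ['_']
     if parts.length ≤ 1 then pyCapitalize w
     else camel_case_path (parts.map String.ofList))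
    = PySem.Str.join "" ((PySem.Chars.splitOn w.toList ['_']).map (fun p => pyCapitalize (String.ofList p))) := by
  simp only [splitOn_eq_mySplit]
  by_cases h0 : w.toList.count '_' = 0
  · rw [mySplit_of_count_zero h0]
    simp [join_empty, String.ofList_toList]
  · have hlen : ¬ (mySplit w.toList).length ≤ 1 := by
      rw [length_mySplit]; omega
    simp only [hlen, if_false]
    rw [camel_case_path]
    congr 1
    have hbody : ∀ (x : {y // y ∈ (mySplit w.toList).map String.ofList}),
        (let parts := PySem.Chars.splitOn x.1.toList ['_']
         if parts.length ≤ 1 then pyCapitalize x.1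
         else camel_case_path (parts.map String.ofList))
        = pyCapitalize x.1 := by
      intro x
      obtain ⟨p, hp, hx⟩ := List.mem_map.1 x.2
      have hc : p.count '_' = 0 := mem_mySplit_count hp
      have : x.1.toList = p := by rw [← hx]; simp [String.toList_ofList]
      simp [splitOn_eq_mySplit, this, mySplit_of_count_zero hc]
    calc ((mySplit w.toList).map String.ofList).attach.map _
        = ((mySplit w.toList).map String.ofList).attach.map (fun x => pyCapitalize x.1) := by
          exact List.map_congr_left (fun x _ => hbody x)
      _ = (mySplit w.toList).map (fun p => pyCapitalize (String.ofList p)) := by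
          simp [List.map_map]

-- ===== VERDICT (by name: the statement is the Claim_ definition above) =====
theorem camel_case_path_spec : Claim_equal_camel_case_path := by
  intro xs _
  unfold Spec_camel_case_path
  rw [camel_case_path, camel_case_path_alt]
  have hmap : xs.attach.map (fun w =>
      let parts := PySem.Chars.splitOn w.1.toList ['_']
      if parts.length ≤ 1 then pyCapitalize w.1
      else camel_case_path (parts.map String.ofList))
      = xs.map (fun word => PySem.Str.join ""
          ((PySem.Chars.splitOn word.toList ['_']).map (fun p => pyCapitalize (String.ofList p)))) := by
    calc xs.attach.map _
        = xs.attach.map (fun w => PySem.Str.join ""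
            ((PySem.Chars.splitOn w.1.toList ['_']).map (fun p => pyCapitalize (String.ofList p)))) :=
          List.map_congr_left (fun w _ => word_eq w.1)
      _ = _ := by simp
  rw [hmap]
  simp only [join_empty]
  congr 1
  simp [List.map_map, List.flatMap_def, Function.comp_def,
        List.flatten_flatten, List.map_flatten]
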